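-- pv_equiv track=rewrite | github.com/agmonetti/TPOJuego2048 | TPO_2048.py | comp_izq_r
-- ===== SOURCE A (Python) =====
-- def comp_izq_r(lis,k):
--     '''comprueba si algun elemento de la lista se podria mover/ combinar hacia la izquierda'''
--
--     se_puede = False
--     if k != 0 and not se_puede:
--         if lis[k-1] == lis[k] and lis[k]!=0:
--             return True
--         elif lis[k-1]== 0 and lis[k]!=0:
--             return True
--
--         se_puede = comp_izq_r(lis,k-1)
--
--     return se_puede
-- ===== SOURCE B (Python) =====
-- def comp_izq_r(lis, k):
--     '''comprueba si algun elemento de la lista se podria mover/ combinar hacia la izquierda'''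
--     return any(lis[i] != 0 and (lis[i - 1] == lis[i] or lis[i - 1] == 0)
--                for i in range(1, k + 1))
-- ===== Notes on version B (the rewrite author's own statement) =====
-- stated objective: idiomatic
-- what changed: Replaces the downward recursion with a single any(...) over a forward range of adjacent pairs, no recursion and no early-return chain.
-- outside the precondition, e.g. on comp_izq_r([1, 1], -1): A returns True, B returns False
import Mathlib
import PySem

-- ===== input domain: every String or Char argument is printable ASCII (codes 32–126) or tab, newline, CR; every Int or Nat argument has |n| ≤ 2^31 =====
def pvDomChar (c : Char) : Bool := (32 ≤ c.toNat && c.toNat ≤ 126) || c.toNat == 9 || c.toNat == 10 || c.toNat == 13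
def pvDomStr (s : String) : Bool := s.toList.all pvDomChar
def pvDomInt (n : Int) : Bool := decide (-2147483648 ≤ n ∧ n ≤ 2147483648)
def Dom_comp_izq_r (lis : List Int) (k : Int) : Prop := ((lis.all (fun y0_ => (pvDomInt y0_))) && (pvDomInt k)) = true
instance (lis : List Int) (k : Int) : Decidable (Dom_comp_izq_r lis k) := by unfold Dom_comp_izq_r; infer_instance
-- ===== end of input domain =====

-- B replaces A's downward recursion with an iterative any(...) over the forward range of
-- adjacent pairs (objective: idiomatic; same return value on Pre_).

-- ===== PORT A =====
-- A recurses on k down to 0; on Pre_ (0 ≤ k), k is a Nat, so the recursion is on k.toNat.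
-- When an index is out of range Python raises IndexError (outside Pre_); the port returns false there.
def comp_izq_rA : List Int → Nat → Bool
  | _, 0 => false
  | lis, n + 1 =>
    match PySem.List.pyGet? lis (n : Int), PySem.List.pyGet? lis ((n : Int) + 1) with
    | some a, some b =>
      if a == b && b != 0 then true
      else if a == 0 && b != 0 then true
      else comp_izq_rA lis n
    | _, _ => false

def comp_izq_r (lis : List Int) (k : Int) : Bool :=
  comp_izq_rA lis k.toNat

-- ===== PORT B =====
def comp_izq_r_alt (lis : List Int) (k : Int) : Bool :=
  (PySem.List.pyRange 1 (k + 1) 1).any (fun i =>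
    match PySem.List.pyGet? lis i, PySem.List.pyGet? lis (i - 1) with
    | some b, some a => b != 0 && (a == b || a == 0)
    | _, _ => false)

-- ===== PRECONDITION & SPEC =====
-- Pre_ excludes k ≥ len(lis) (A raises IndexError at lis[k]) and k < 0, where A's downward
-- recursion over negative wraparound indices either raises IndexError or returns a
-- negative-index-wraparound accident; B's forward range is empty there.
def Pre_comp_izq_r (lis : List Int) (k : Int) : Prop :=
  0 ≤ k ∧ (k = 0 ∨ k < lis.length)
instance (lis : List Int) (k : Int) : Decidable (Pre_comp_izq_r lis k) := by
  unfold Pre_comp_izq_r; infer_instance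

def pvWitness_comp_izq_r : List Int × Int := ([2, 2, 4], 1)

def Spec_comp_izq_r (lis : List Int) (k : Int) (out : Bool) : Prop := out = comp_izq_r_alt lis k
instance (lis : List Int) (k : Int) (out : Bool) : Decidable (Spec_comp_izq_r lis k out) := by
  unfold Spec_comp_izq_r; infer_instance

-- ===== CLAIM (what is proved, stated in full; the proofs are below) =====
def Claim_equal_comp_izq_r : Prop := ∀ (lis : List Int) (k : Int), Dom_comp_izq_r lis k → Pre_comp_izq_r lis k → Spec_comp_izq_r lis k (comp_izq_r lis k)

-- ===== LEMMAS AND PROOFS =====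

-- the pair predicate B tests at position i
def pvPair (lis : List Int) (i : Int) : Bool :=
  match PySem.List.pyGet? lis i, PySem.List.pyGet? lis (i - 1) with
  | some b, some a => b != 0 && (a == b || a == 0)
  | _, _ => false

theorem comp_izq_rA_eq_any (lis : List Int) :
    ∀ n : Nat, n < lis.length →
      comp_izq_rA lis n = (PySem.List.pyRange 1 ((n : Int) + 1) 1).any (pvPair lis) := by
  intro n
  induction n with
  | zero =>
      intro _
      simp [comp_izq_rA]
  | succ n ih =>
      intro hlt
      have hn : n < lis.length := by omega
      have h1 : PySem.List.pyGet? lis (n : Int) = some lis[n] :=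
        PySem.List.pyGet?_ofNat lis n hn
      have h2 : PySem.List.pyGet? lis ((n : Int) + 1) = some lis[n + 1] := by
        have h := PySem.List.pyGet?_ofNat lis (n + 1) hlt
        rw [show ((((n : Nat) + 1 : Nat)) : Int) = (n : Int) + 1 by push_cast; ring] at h
        exact h
      have hsplit : PySem.List.pyRange 1 (((n : Nat) + 1 : Int) + 1) 1
          = PySem.List.pyRange 1 ((n : Int) + 1) 1 ++ [(n : Int) + 1] :=
        PySem.List.pyRange_one_succ_right (a := 1) (b := (n : Int) + 1) (by omega)
      rw [show ((((n : Nat) + 1 : Nat)) : Int) = (n : Int) + 1 by push_cast; ring, hsplit,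
        List.any_append]
      show comp_izq_rA lis (n + 1) = _
      rw [comp_izq_rA, h1, h2, ih hn]
      have hp : pvPair lis ((n : Int) + 1)
          = (lis[n + 1] != 0 && (lis[n] == lis[n + 1] || lis[n] == 0)) := by
        simp only [pvPair, h2, show (n : Int) + 1 - 1 = (n : Int) by ring, h1]
      simp only [List.any_cons, List.any_nil, hp]
      cases hab : (lis[n] == lis[n + 1]) <;> cases hb : (lis[n + 1] == 0) <;>
        cases ha : (lis[n] == 0) <;> simp_all [bne]
-- ===== VERDICT (by name: the statement is the Claim_ definition above) =====
theorem comp_izq_r_spec : Claim_equal_comp_izq_r := by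
  intro lis k _ hpre
  unfold Spec_comp_izq_r comp_izq_r comp_izq_r_alt
  obtain ⟨hk0, hk⟩ := hpre
  rcases hk with hk | hk
  · subst hk; simp [comp_izq_rA]
  · have hkn : (k.toNat : Int) = k := Int.toNat_of_nonneg hk0
    have hlt : k.toNat < lis.length := by omega
    have := comp_izq_rA_eq_any lis k.toNat hlt
    rw [this, hkn]
    rfl
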